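-- pv_equiv track=rewrite | github.com/julibeg/csq2mat | src/csq2mat/funcs.py | get_leftmost_set_bit
-- ===== SOURCE A (Python) =====
-- def get_leftmost_set_bit(n: int) -> int:
--     if n < 0:
--         raise (
--             ValueError,
--             f"Cannot get leftmost set bit for negative number: number was {n}",
--         )
--     elif n == 0:
--         return 0
--     lmb = 1
--     while n > 1:
--         n >>= 1
--         lmb += 1
--     return lmb
-- ===== SOURCE B (Python) =====
-- def get_leftmost_set_bit(n: int) -> int:
--     if n < 0:
--         raise ValueError(
--             f"Cannot get leftmost set bit for negative number: number was {n}"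
--         )
--     return n.bit_length()
-- ===== Notes on version B (the rewrite author's own statement) =====
-- stated objective: idiomatic
-- what changed: Replaces the hand-written shift-and-count while loop with the closed-form int.bit_length() builtin (n>=0), which equals the loop's count.
import Mathlib
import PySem

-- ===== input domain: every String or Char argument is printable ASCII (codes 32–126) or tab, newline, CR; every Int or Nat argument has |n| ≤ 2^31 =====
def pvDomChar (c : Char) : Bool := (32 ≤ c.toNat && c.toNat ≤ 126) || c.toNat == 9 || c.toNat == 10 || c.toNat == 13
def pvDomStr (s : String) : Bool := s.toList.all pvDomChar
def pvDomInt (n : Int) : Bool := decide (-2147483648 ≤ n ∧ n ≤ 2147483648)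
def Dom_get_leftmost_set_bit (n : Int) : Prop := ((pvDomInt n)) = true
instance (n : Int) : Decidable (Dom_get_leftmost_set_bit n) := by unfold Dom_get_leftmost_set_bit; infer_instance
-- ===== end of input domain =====

-- B replaces A's shift-and-count while loop by Python's int.bit_length() builtin (idiomatic closed form).
-- Pre_ excludes n < 0, where both programs raise (A raises a tuple -> TypeError, B raises ValueError).


-- ===== PORT A =====
-- the while loop: while n > 1: n >>= 1; lmb += 1   (n ≥ 0 throughout under Pre_; >> 1 on a
-- nonnegative int is floor division by 2, exact here via PySem.Int.floordiv)
def pvLoopA (n lmb : Int) : Int :=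
  if h : n > 1 then pvLoopA (PySem.Int.floordiv n 2) (lmb + 1) else lmb
termination_by n.toNat
decreasing_by
  have hd := Int.fdiv_eq_ediv_of_nonneg n (by omega : (0:Int) ≤ 2)
  simp [PySem.Int.floordiv, hd]
  omega

def get_leftmost_set_bit (n : Int) : Int :=
  if n < 0 then 0            -- raise: unreachable under Pre_
  else if n = 0 then 0
  else pvLoopA n 1

-- ===== PORT B =====
-- n.bit_length() for n ≥ 0: 0 for n = 0, otherwise log2 n + 1
def get_leftmost_set_bit_alt (n : Int) : Int :=
  if n < 0 then 0            -- raise ValueError: unreachable under Pre_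
  else if n = 0 then 0
  else (Nat.log2 n.toNat : Int) + 1

-- ===== PRECONDITION & SPEC =====
-- Pre_ excludes n < 0, where both Pythons raise (A a TypeError, B a ValueError).
def Pre_get_leftmost_set_bit (n : Int) : Prop := 0 ≤ n
instance (n : Int) : Decidable (Pre_get_leftmost_set_bit n) := by unfold Pre_get_leftmost_set_bit; infer_instance
def pvWitness_get_leftmost_set_bit : Int := 5

def Spec_get_leftmost_set_bit (n : Int) (out : Int) : Prop := out = get_leftmost_set_bit_alt n
instance (n : Int) (out : Int) : Decidable (Spec_get_leftmost_set_bit n out) := by unfold Spec_get_leftmost_set_bit; infer_instance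

-- ===== CLAIM (what is proved, stated in full; the proofs are below) =====
def Claim_equal_get_leftmost_set_bit : Prop := ∀ (n : Int), Dom_get_leftmost_set_bit n → Pre_get_leftmost_set_bit n → Spec_get_leftmost_set_bit n (get_leftmost_set_bit n)

-- ===== LEMMAS AND PROOFS =====
-- For m ≥ 1 the loop adds log2 m to its accumulator.
theorem pvLoopA_eq (m : Nat) (hm : 1 ≤ m) : ∀ lmb : Int, pvLoopA (m : Int) lmb = lmb + (Nat.log2 m : Int) := by
  induction m using Nat.strong_induction_on with
  | _ m ih =>
    intro lmb
    rw [pvLoopA.eq_def]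
    by_cases h2 : 2 ≤ m
    · have hgt : (m : Int) > 1 := by exact_mod_cast h2
      have hdiv : PySem.Int.floordiv (m : Int) 2 = ((m / 2 : Nat) : Int) := by
        rw [PySem.Int.floordiv, Int.fdiv_eq_ediv_of_nonneg _ (by omega : (0:Int) ≤ 2)]
        omega
      have hlt : m / 2 < m := Nat.div_lt_self (by omega) (by omega)
      have h1 : 1 ≤ m / 2 := by omega
      rw [dif_pos hgt, hdiv, ih (m / 2) hlt h1]
      have hl : Nat.log2 m = Nat.log2 (m / 2) + 1 := by
        rw [Nat.log2_eq_log_two, Nat.log2_eq_log_two, Nat.log_div_base]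
        have := Nat.log_pos (by omega : 1 < 2) (by omega : 2 ≤ m)
        omega
      rw [hl]
      push_cast
      ring
    · have hm1 : m = 1 := by omega
      subst hm1
      have : Nat.log2 1 = 0 := by decide
      rw [this]
      norm_num

-- ===== VERDICT (by name: the statement is the Claim_ definition above) =====
theorem get_leftmost_set_bit_spec : Claim_equal_get_leftmost_set_bit := by
  intro n _ hpre
  unfold Spec_get_leftmost_set_bit get_leftmost_set_bit get_leftmost_set_bit_alt
  have hnn : ¬ n < 0 := not_lt.mpr hpre
  rw [if_neg hnn, if_neg hnn]
  by_cases h0 : n = 0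
  · simp [h0]
  · rw [if_neg h0, if_neg h0]
    have h1 : 1 ≤ n.toNat := by omega
    have hn : ((n.toNat : Int)) = n := Int.toNat_of_nonneg hpre
    calc pvLoopA n 1 = pvLoopA (n.toNat : Int) 1 := by rw [hn]
      _ = 1 + (Nat.log2 n.toNat : Int) := pvLoopA_eq n.toNat h1 1
      _ = (Nat.log2 n.toNat : Int) + 1 := by ring
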